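-- pv_equiv track=rewrite | github.com/dilutedbinary/word-unscrambler | unscrambler.py | _check_for_word_subset
-- ===== SOURCE A (Python) =====
-- def _check_for_word_subset(a, b):
--     # Return true, XXXX if a is sub of b, XXXX, true if b is sub of a
--     a = list(a)
--     b = list(b)
--     only_a_has = []
--     only_b_has = []
--     for char in a:
--
--         if char in b:
--             del b[b.index(char)]
--         else:
--             only_a_has.append(char)
--     only_b_has = b
--     return len(only_a_has) == 0, len(only_b_has) == 0
-- ===== SOURCE B (Python) =====
-- def _check_for_word_subset(a, b):
--     # Count-based: a is a multiset-subset of b iff every char of a occurs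
--     # at least as often in b, and symmetrically for the second component.
--     a = list(a)
--     b = list(b)
--     a_sub = all(a.count(c) <= b.count(c) for c in a)
--     b_sub = all(b.count(c) <= a.count(c) for c in b)
--     return a_sub, b_sub
-- ===== Notes on version B (the rewrite author's own statement) =====
-- stated objective: alternative
-- what changed: Replaced A's destructive removal loop (membership test + index + del on a shrinking copy of b, collecting unmatched chars) by a direct per-character occurrence-count comparison in each direction.
import Mathlib
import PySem

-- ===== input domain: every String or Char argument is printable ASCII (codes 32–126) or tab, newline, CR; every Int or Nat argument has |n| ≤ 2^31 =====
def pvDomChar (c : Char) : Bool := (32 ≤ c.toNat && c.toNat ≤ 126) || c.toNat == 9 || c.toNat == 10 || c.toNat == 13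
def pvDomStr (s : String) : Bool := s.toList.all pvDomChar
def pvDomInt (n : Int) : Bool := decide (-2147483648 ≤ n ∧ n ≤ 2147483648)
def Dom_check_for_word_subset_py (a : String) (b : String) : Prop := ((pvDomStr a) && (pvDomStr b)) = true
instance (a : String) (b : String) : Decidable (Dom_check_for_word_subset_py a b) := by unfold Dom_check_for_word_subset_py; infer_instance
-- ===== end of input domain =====

-- B replaces A's destructive remove-first-occurrence loop by per-character count comparisons (alternative decomposition, same cost).

-- ===== PORT A =====
-- the for-loop over a with state (b, only_a_has); `del b[b.index(char)]` under `char in b`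
-- removes the first occurrence of char, which is exactly List.erase.
def pvLoopA : List Char → List Char → List Char → List Char × List Char
  | [], b, onlyA => (onlyA, b)
  | ch :: rest, b, onlyA =>
      if ch ∈ b then pvLoopA rest (b.erase ch) onlyA
      else pvLoopA rest b (onlyA ++ [ch])

def check_for_word_subset_py (a : String) (b : String) : Bool × Bool :=
  let r := pvLoopA a.toList b.toList []
  (r.1.length == 0, r.2.length == 0)

-- ===== PORT B =====
def check_for_word_subset_py_alt (a : String) (b : String) : Bool × Bool :=
  let al := a.toList
  let bl := b.toList
  (al.all (fun c => decide (PySem.List.count al c ≤ PySem.List.count bl c)),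
   bl.all (fun c => decide (PySem.List.count bl c ≤ PySem.List.count al c)))

-- ===== PRECONDITION & SPEC =====
def Spec_check_for_word_subset_py (a : String) (b : String) (out : Bool × Bool) : Prop := out = check_for_word_subset_py_alt a b
instance (a : String) (b : String) (out : Bool × Bool) : Decidable (Spec_check_for_word_subset_py a b out) := by unfold Spec_check_for_word_subset_py; infer_instance

-- ===== CLAIM (what is proved, stated in full; the proofs are below) =====
def Claim_equal_check_for_word_subset_py : Prop := ∀ (a : String) (b : String), Dom_check_for_word_subset_py a b → Spec_check_for_word_subset_py a b (check_for_word_subset_py a b)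

-- ===== LEMMAS AND PROOFS =====

-- count of c in b.erase ch / ch :: rest, with the if resolved
theorem pvCount_erase (b : List Char) (ch c : Char) :
    (b.erase ch).count c = if ch = c then b.count c - 1 else b.count c := by
  rw [List.count_erase]; by_cases hc : ch = c <;> simp [hc]

theorem pvCount_cons (rest : List Char) (ch c : Char) :
    (ch :: rest).count c = rest.count c + (if ch = c then 1 else 0) := by
  by_cases hc : ch = c <;> simp [hc]

-- first component of the loop: no unmatched char of a ↔ a's counts are dominated by b's
theorem pvLoopA_fst (a : List Char) : ∀ (b acc : List Char),
    ((pvLoopA a b acc).1 = [] ↔ (acc = [] ∧ ∀ c, a.count c ≤ b.count c)) := by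
  induction a with
  | nil =>
    intro b acc
    simp [pvLoopA]
  | cons ch rest ih =>
    intro b acc
    by_cases h : ch ∈ b
    · simp only [pvLoopA, if_pos h]
      rw [ih]
      have hb : 1 ≤ b.count ch := List.one_le_count_iff.mpr h
      constructor
      · rintro ⟨hacc, hcnt⟩
        refine ⟨hacc, fun c => ?_⟩
        have := hcnt c
        rw [pvCount_erase] at this
        rw [pvCount_cons]
        by_cases hc : ch = c
        · subst hc; simp only [reduceIte] at this ⊢; omega
        · simp only [if_neg hc] at this ⊢; omega
      · rintro ⟨hacc, hcnt⟩
        refine ⟨hacc, fun c => ?_⟩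
        have := hcnt c
        rw [pvCount_cons] at this
        rw [pvCount_erase]
        by_cases hc : ch = c
        · subst hc; simp only [reduceIte] at this ⊢; omega
        · simp only [if_neg hc] at this ⊢; omega
    · simp only [pvLoopA, if_neg h]
      rw [ih]
      constructor
      · rintro ⟨hacc, -⟩
        exact absurd hacc (by simp)
      · rintro ⟨-, hcnt⟩
        have := hcnt ch
        rw [List.count_cons_self, List.count_eq_zero_of_not_mem h] at this
        omega

-- second component of the loop: b fully consumed ↔ b's counts are dominated by a's
theorem pvLoopA_snd (a : List Char) : ∀ (b acc : List Char),
    ((pvLoopA a b acc).2 = [] ↔ ∀ c, b.count c ≤ a.count c) := by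
  induction a with
  | nil =>
    intro b acc
    simp only [pvLoopA]
    constructor
    · rintro rfl; simp
    · intro h
      refine List.eq_nil_iff_forall_not_mem.mpr fun c hc => ?_
      have h1 := h c
      simp only [List.count_nil] at h1
      have h2 := List.one_le_count_iff.mpr hc
      omega
  | cons ch rest ih =>
    intro b acc
    by_cases h : ch ∈ b
    · simp only [pvLoopA, if_pos h]
      rw [ih]
      have hb : 1 ≤ b.count ch := List.one_le_count_iff.mpr h
      constructor
      · intro hcnt c
        have := hcnt c
        rw [pvCount_erase] at this
        rw [pvCount_cons]
        by_cases hc : ch = c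
        · subst hc; simp only [reduceIte] at this ⊢; omega
        · simp only [if_neg hc] at this ⊢; omega
      · intro hcnt c
        have := hcnt c
        rw [pvCount_cons] at this
        rw [pvCount_erase]
        by_cases hc : ch = c
        · subst hc; simp only [reduceIte] at this ⊢; omega
        · simp only [if_neg hc] at this ⊢; omega
    · simp only [pvLoopA, if_neg h]
      rw [ih]
      have hb : b.count ch = 0 := List.count_eq_zero_of_not_mem h
      constructor
      · intro hcnt c
        have := hcnt c
        rw [pvCount_cons]
        by_cases hc : ch = c
        · subst hc; omega
        · simp only [if_neg hc]; omega
      · intro hcnt c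
        have := hcnt c
        rw [pvCount_cons] at this
        by_cases hc : ch = c
        · subst hc; simp only [reduceIte] at this; omega
        · simp only [if_neg hc] at this; omega

-- B's all-over-the-list test equals the unrestricted ∀ (absent chars have count 0)
theorem pvAll_count (xs ys : List Char) :
    (xs.all (fun c => decide (PySem.List.count xs c ≤ PySem.List.count ys c)) = true)
      ↔ ∀ c, xs.count c ≤ ys.count c := by
  simp only [List.all_eq_true, decide_eq_true_eq, PySem.List.count_eq]
  constructor
  · intro h c
    by_cases hc : c ∈ xs
    · exact h c hc
    · rw [List.count_eq_zero_of_not_mem hc]; omega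
  · intro h c _
    exact h c

-- ===== VERDICT (by name: the statement is the Claim_ definition above) =====
theorem check_for_word_subset_py_spec : Claim_equal_check_for_word_subset_py := by
  intro a b _
  show _ = _
  unfold check_for_word_subset_py check_for_word_subset_py_alt
  simp only
  refine Prod.ext ?_ ?_
  · rw [Bool.eq_iff_iff]
    simp only [beq_iff_eq, List.length_eq_zero_iff]
    rw [pvLoopA_fst, pvAll_count]
    simp
  · rw [Bool.eq_iff_iff]
    simp only [beq_iff_eq, List.length_eq_zero_iff]
    rw [pvLoopA_snd, pvAll_count]
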